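-- pv_equiv track=rewrite | github.com/JosueSalomon/Proyecto-Compiladores | final.py | convertir_decimal_a_maya
-- ===== SOURCE A (Python) =====
-- def convertir_decimal_a_maya(n):
--     if n == 0:
--         return "0"  # Concha se le agrega un cero
--
--     mayan_digits = []
--     while n > 0:
--         remainder = n % 20
--         mayan_digits.append(remainder)
--         n //= 20
--
--     # Convertir los dígitos a una representación textual en maya
--     def value_to_mayan_string(value):
--         if value == 0:
--             return "0"  # Concha se le agrega un cero
--         result = []
--         bars = value // 5
--         points = value % 5
--
--         result.extend(['.' * points])  # Puntos
--         result.extend(['|' * bars])  # Barras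
--         return ''.join(result)
--
--     mayan_representation = [value_to_mayan_string(value) for value in reversed(mayan_digits)]
--     return ' '.join(mayan_representation)
-- ===== SOURCE B (Python) =====
-- def convertir_decimal_a_maya(n):
--     if n == 0:
--         return "0"
--
--     def digit_to_mayan(value):
--         if value == 0:
--             return "0"
--         return '.' * (value % 5) + '|' * (value // 5)
--
--     def rec(m):
--         if m <= 0:
--             return []
--         return rec(m // 20) + [digit_to_mayan(m % 20)]
--
--     return ' '.join(rec(n))
-- ===== Notes on version B (the rewrite author's own statement) =====
-- stated objective: alternative
-- what changed: Replaces the while-loop that collects base-twenty digits least-significant-first plus a reverse-and-map pass with a single recursion on the quotient that emits digit strings most-significant-first directly.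
import Mathlib
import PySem

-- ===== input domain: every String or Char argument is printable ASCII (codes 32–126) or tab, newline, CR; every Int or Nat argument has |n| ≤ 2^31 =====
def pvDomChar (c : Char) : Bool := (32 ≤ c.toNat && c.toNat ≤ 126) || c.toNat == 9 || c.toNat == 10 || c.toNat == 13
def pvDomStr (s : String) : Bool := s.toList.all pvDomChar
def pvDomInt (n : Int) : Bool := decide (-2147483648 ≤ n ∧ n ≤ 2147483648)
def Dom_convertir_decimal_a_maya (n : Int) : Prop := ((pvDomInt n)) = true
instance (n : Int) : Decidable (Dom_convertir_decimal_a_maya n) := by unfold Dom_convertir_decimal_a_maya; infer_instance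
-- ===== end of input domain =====

-- B: same digit formatting, but a recursion on n // 20 emitting digits most-significant-first,
-- replacing A's collect-then-reverse loop; same cost, different decomposition.
-- ===== PORT A =====
-- termination helper for both ports' recursion on m // 20
theorem pvFloordiv20_toNat_lt (m : Int) (h : 0 < m) :
    (PySem.Int.floordiv m 20).toNat < m.toNat := by
  rw [PySem.Int.floordiv_eq_ediv_of_pos (by norm_num)]
  have h1 : m / 20 < m := by
    apply Int.ediv_lt_of_lt_mul (by norm_num)
    nlinarith
  have h2 : 0 ≤ m / 20 := Int.ediv_nonneg (le_of_lt h) (by norm_num)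
  omega

-- the while loop: collects n % 20 digits least-significant-first while n > 0
def pvLoopA (m : Int) : List Int :=
  if h : 0 < m then
    PySem.Int.mod m 20 :: pvLoopA (PySem.Int.floordiv m 20)
  else []
termination_by m.toNat
decreasing_by exact pvFloordiv20_toNat_lt m h

-- value_to_mayan_string: ''.join(['.' * points, '|' * bars]); '.' * k is exact as
-- List.replicate k.toNat '.' since points/bars are nonnegative here
def pvValueToMayanString (value : Int) : String :=
  if value == 0 then "0"
  else
    String.mk (PySem.Chars.join []
      [List.replicate (PySem.Int.mod value 5).toNat '.',
       List.replicate (PySem.Int.floordiv value 5).toNat '|'])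

def convertir_decimal_a_maya (n : Int) : String :=
  if n == 0 then "0"
  else
    PySem.Str.join " " ((pvLoopA n).reverse.map pvValueToMayanString)

-- ===== PORT B =====
-- per-digit formatter: '.' * (v % 5) + '|' * (v // 5), exact as replicate ++ replicate
def pvDigitToMayan (value : Int) : String :=
  if value == 0 then "0"
  else
    String.mk (List.replicate (PySem.Int.mod value 5).toNat '.' ++
               List.replicate (PySem.Int.floordiv value 5).toNat '|')

def pvRecB (m : Int) : List String :=
  if h : m ≤ 0 then []
  else pvRecB (PySem.Int.floordiv m 20) ++ [pvDigitToMayan (PySem.Int.mod m 20)]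
termination_by m.toNat
decreasing_by exact pvFloordiv20_toNat_lt m (by omega)

def convertir_decimal_a_maya_alt (n : Int) : String :=
  if n == 0 then "0"
  else PySem.Str.join " " (pvRecB n)

-- ===== PRECONDITION & SPEC =====
def Spec_convertir_decimal_a_maya (n : Int) (out : String) : Prop := out = convertir_decimal_a_maya_alt n
instance (n : Int) (out : String) : Decidable (Spec_convertir_decimal_a_maya n out) := by unfold Spec_convertir_decimal_a_maya; infer_instance

-- ===== CLAIM (what is proved, stated in full; the proofs are below) =====
def Claim_equal_convertir_decimal_a_maya : Prop := ∀ (n : Int), Dom_convertir_decimal_a_maya n → Spec_convertir_decimal_a_maya n (convertir_decimal_a_maya n)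

-- ===== LEMMAS AND PROOFS =====

-- the two per-digit formatters produce the same string
theorem pvDigit_eq (v : Int) : pvValueToMayanString v = pvDigitToMayan v := by
  unfold pvValueToMayanString pvDigitToMayan
  by_cases h : v == 0
  · simp [h]
  · simp only [h]
    congr 1
    simp [PySem.Chars.join, List.intercalate]

-- B's recursion equals A's reversed-and-mapped digit list
theorem pvRecB_eq (m : Int) :
    pvRecB m = (pvLoopA m).reverse.map pvValueToMayanString := by
  rw [pvRecB, pvLoopA]
  by_cases h : 0 < m
  · have h' : ¬ m ≤ 0 := by omega
    simp only [h, h', dif_pos, dif_neg, not_false_iff, List.reverse_cons,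
      List.map_append, List.map_cons, List.map_nil]
    rw [pvRecB_eq (PySem.Int.floordiv m 20), pvDigit_eq]
  · have h' : m ≤ 0 := by omega
    simp [h, h']
termination_by m.toNat
decreasing_by exact pvFloordiv20_toNat_lt m h


-- ===== VERDICT (by name: the statement is the Claim_ definition above) =====
theorem convertir_decimal_a_maya_spec : Claim_equal_convertir_decimal_a_maya := by
  intro n _
  unfold Spec_convertir_decimal_a_maya
  unfold convertir_decimal_a_maya convertir_decimal_a_maya_alt
  by_cases h : n == 0
  · simp [h]
  · simp only [h, if_false, pvRecB_eq]
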